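-- pv_equiv track=rewrite | github.com/HoChangSUNG/sparta_algorithm | week_5/03_is_correct_parentheses_my_ver.py | balanced_or_correct_parentheses_return_and_check
-- ===== SOURCE A (Python) =====
-- from collections import deque
--
-- def balanced_or_correct_parentheses_return_and_check(string) :
--     queue = deque(string)
--     stack= []
--     correct_check = True
--     u = ""
--     left, right = 0, 0
--     while queue :
--         char = queue.popleft()
--         u+= char
--         if  char == '(' :
--             left +=1
--             stack.append('s')
--         else :
--             right+=1
--             if stack :
--                 stack.pop()
--             else :
--                 correct_check = False
--         if left ==right:
--             break
--     if len(stack) != 0 :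
--         correct_check =False
--     return u,"".join(list(queue)),correct_check
-- ===== SOURCE B (Python) =====
-- def balanced_or_correct_parentheses_return_and_check(string):
--     balance = 0
--     correct = True
--     split = len(string)
--     for i, ch in enumerate(string):
--         if ch == '(':
--             balance += 1
--         else:
--             balance -= 1
--             if balance < 0:
--                 correct = False
--         if balance == 0:
--             split = i + 1
--             break
--     if balance != 0:
--         correct = False
--     return string[:split], string[split:], correct
-- ===== Notes on version B (the rewrite author's own statement) =====
-- stated objective: simpler
-- what changed: Replaces the deque, the explicit list-stack and the left/right counters with a single integer balance counter over an indexed for-loop, and returns slices of the input instead of rebuilding prefix and remainder strings character by character.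
import Mathlib
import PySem

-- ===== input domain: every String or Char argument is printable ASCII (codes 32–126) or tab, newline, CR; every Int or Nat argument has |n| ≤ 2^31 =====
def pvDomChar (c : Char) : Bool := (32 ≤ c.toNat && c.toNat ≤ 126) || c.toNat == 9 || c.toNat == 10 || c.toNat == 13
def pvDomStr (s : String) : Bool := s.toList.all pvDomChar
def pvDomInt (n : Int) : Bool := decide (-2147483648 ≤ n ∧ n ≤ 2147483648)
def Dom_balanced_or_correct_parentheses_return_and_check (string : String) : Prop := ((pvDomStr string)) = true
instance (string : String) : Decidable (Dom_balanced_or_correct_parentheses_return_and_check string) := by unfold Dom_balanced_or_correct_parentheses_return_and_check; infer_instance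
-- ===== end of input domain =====

-- B replaces the deque + list-stack + left/right counters with one integer balance
-- counter over an indexed loop and returns slices of the input (objective: simpler).

-- ===== PORT A =====
-- while loop over the deque: queue = remaining chars, u = consumed chars,
-- stack as a list (pushed at the head; only its emptiness/length is ever used).
def pvALoop (queue : List Char) (stack : List Char) (u : List Char)
    (correct : Bool) (left right : Int) : String × String × Bool :=
  match queue with
  | [] => (String.ofList u, String.ofList ([] : List Char),
           if stack.length ≠ 0 then false else correct)
  | c :: rest =>
    let u' := u ++ [c]
    if c = '(' then
      let stack' := 's' :: stack
      if left + 1 = right then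
        (String.ofList u', String.ofList rest, if stack'.length ≠ 0 then false else correct)
      else pvALoop rest stack' u' correct (left + 1) right
    else
      match stack with
      | _ :: s' =>
        if left = right + 1 then
          (String.ofList u', String.ofList rest, if s'.length ≠ 0 then false else correct)
        else pvALoop rest s' u' correct left (right + 1)
      | [] =>
        if left = right + 1 then
          (String.ofList u', String.ofList rest, false)
        else pvALoop rest [] u' false left (right + 1)

def balanced_or_correct_parentheses_return_and_check (string : String) : String × String × Bool :=
  pvALoop string.toList [] [] true 0 0

-- ===== PORT B =====
-- indexed for-loop with a single balance counter; returns (balance, correct, split).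
def pvBLoop (cs : List Char) (i : Nat) (balance : Int) (correct : Bool) (n : Nat) :
    Int × Bool × Nat :=
  match cs with
  | [] => (balance, correct, n)
  | c :: rest =>
    if c = '(' then
      if balance + 1 = 0 then (balance + 1, correct, i + 1)
      else pvBLoop rest (i + 1) (balance + 1) correct n
    else
      let correct' := if balance - 1 < 0 then false else correct
      if balance - 1 = 0 then (balance - 1, correct', i + 1)
      else pvBLoop rest (i + 1) (balance - 1) correct' n

def balanced_or_correct_parentheses_return_and_check_alt (string : String) : String × String × Bool :=
  let cs := string.toList
  let r := pvBLoop cs 0 0 true cs.length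
  (String.ofList (cs.take r.2.2), String.ofList (cs.drop r.2.2),
   if r.1 ≠ 0 then false else r.2.1)

-- ===== PRECONDITION & SPEC =====
def Spec_balanced_or_correct_parentheses_return_and_check (string : String) (out : String × String × Bool) : Prop := out = balanced_or_correct_parentheses_return_and_check_alt string
instance (string : String) (out : String × String × Bool) : Decidable (Spec_balanced_or_correct_parentheses_return_and_check string out) := by unfold Spec_balanced_or_correct_parentheses_return_and_check; infer_instance

-- ===== CLAIM (what is proved, stated in full; the proofs are below) =====
def Claim_equal_balanced_or_correct_parentheses_return_and_check : Prop := ∀ (string : String), Dom_balanced_or_correct_parentheses_return_and_check string → Spec_balanced_or_correct_parentheses_return_and_check string (balanced_or_correct_parentheses_return_and_check string)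

-- ===== LEMMAS AND PROOFS =====

theorem pvTakeSplit (u rest : List Char) (c : Char) :
    (u ++ c :: rest).take (u.length + 1) = u ++ [c] := by
  have h : u ++ c :: rest = (u ++ [c]) ++ rest := by simp
  rw [h, show u.length + 1 = (u ++ [c]).length by simp, List.take_left]

-- Bridge invariant: f counts A's failed pops so far; stack length = balance + f,
-- A's running flag equals B's flag conjoined with (f = 0), and f ≠ 0 forces B's flag false.
theorem pvBridge (queue : List Char) : ∀ (stack u : List Char) (cA cB : Bool)
    (left right : Int) (f : Nat),
    (stack.length : Int) = (left - right) + (f : Int) →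
    cA = (cB && decide (f = 0)) →
    (f ≠ 0 → cB = false) →
    pvALoop queue stack u cA left right =
      (let r := pvBLoop queue u.length (left - right) cB (u.length + queue.length)
       (String.ofList ((u ++ queue).take r.2.2), String.ofList ((u ++ queue).drop r.2.2),
        if r.1 ≠ 0 then false else r.2.1)) := by
  induction queue with
  | nil =>
    intro stack u cA cB left right f h1 h2 h3
    simp only [pvALoop, pvBLoop, List.append_nil, List.length_nil, Nat.add_zero,
      List.take_length, List.drop_length, Prod.mk.injEq]
    refine ⟨trivial, trivial, ?_⟩
    by_cases hb : left - right = 0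
    · by_cases hf0 : f = 0
      · have hs : stack.length = 0 := by omega
        simp [hs, hb, h2, hf0]
      · have hs : stack.length ≠ 0 := by omega
        simp [hs, hb, h3 hf0]
    · by_cases hf0 : f = 0
      · have hs : stack.length ≠ 0 := by omega
        simp [hs, hb]
      · simp [hb, h2, hf0, h3 hf0]
  | cons c rest ih =>
    intro stack u cA cB left right f h1 h2 h3
    by_cases hc : c = '('
    · subst hc
      by_cases hbrk : left + 1 = right
      · have hb : left - right + 1 = 0 := by omega
        have hf0 : f ≠ 0 := by omega
        have hcB := h3 hf0
        simp only [pvALoop, pvBLoop, if_pos hbrk, if_pos hb]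
        simp [pvTakeSplit, hcB]
      · have hb : ¬ (left - right + 1 = 0) := by omega
        have hstep := ih ('s' :: stack) (u ++ ['(']) cA cB (left + 1) right f
          (by simp only [List.length_cons]; push_cast; omega) h2 h3
        simp only [pvALoop, pvBLoop, if_neg hbrk, if_neg hb]
        rw [hstep]
        have e3 : left + 1 - right = left - right + 1 := by omega
        simp [e3, Nat.add_comm, Nat.add_left_comm]
    · match stack with
      | s0 :: s' =>
        simp only [List.length_cons] at h1
        by_cases hbrk : left = right + 1
        · have hb : left - right - 1 = 0 := by omega
          have hneg : ¬ (left - right - 1 < 0) := by omega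
          have hfs : (s'.length : Int) = (f : Int) := by push_cast at h1 ⊢; omega
          simp only [pvALoop, pvBLoop, if_neg hc, if_pos hbrk, if_neg hneg, if_pos hb]
          by_cases hf0 : f = 0
          · have hs : s'.length = 0 := by omega
            simp [pvTakeSplit, hs, h2, hf0, hb]
          · have hs : s'.length ≠ 0 := by omega
            simp [pvTakeSplit, hs, h3 hf0, hb]
        · have hb : ¬ (left - right - 1 = 0) := by omega
          have hcB' : (f ≠ 0 → (if left - right - 1 < 0 then false else cB) = false) := by
            intro hf0
            by_cases hneg : left - right - 1 < 0
            · simp [hneg]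
            · simp [hneg, h3 hf0]
          have h2' : cA = ((if left - right - 1 < 0 then false else cB) && decide (f = 0)) := by
            by_cases hf0 : f = 0
            · have hneg : ¬ (left - right - 1 < 0) := by omega
              simp [hneg, h2]
            · simp [h2, hf0]
          have hstep := ih s' (u ++ [c]) cA (if left - right - 1 < 0 then false else cB)
            left (right + 1) f (by push_cast at h1 ⊢; omega) h2' hcB'
          simp only [pvALoop, pvBLoop, if_neg hc, if_neg hbrk, if_neg hb]
          rw [hstep]
          have e3 : left - (right + 1) = left - right - 1 := by omega
          simp [e3, Nat.add_comm, Nat.add_left_comm]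
      | [] =>
        simp only [List.length_nil] at h1
        have hneg : left - right - 1 < 0 := by omega
        have hbrk : ¬ (left = right + 1) := by omega
        have hb : ¬ (left - right - 1 = 0) := by omega
        have hstep := ih [] (u ++ [c]) false false left (right + 1) (f + 1)
          (by push_cast at h1 ⊢; simp; omega) (by simp) (fun _ => rfl)
        simp only [pvALoop, pvBLoop, if_neg hc, if_neg hbrk, if_pos hneg, if_neg hb]
        rw [hstep]
        have e3 : left - (right + 1) = left - right - 1 := by omega
        simp [e3, Nat.add_comm, Nat.add_left_comm]

-- ===== VERDICT (by name: the statement is the Claim_ definition above) =====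
theorem balanced_or_correct_parentheses_return_and_check_spec : Claim_equal_balanced_or_correct_parentheses_return_and_check := by
  intro s _
  unfold Spec_balanced_or_correct_parentheses_return_and_check
  unfold balanced_or_correct_parentheses_return_and_check
  unfold balanced_or_correct_parentheses_return_and_check_alt
  have h := pvBridge s.toList [] [] true true 0 0 0 (by simp) (by simp) (by simp)
  simpa using h
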